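-- pv_equiv track=rewrite | github.com/pdim1950/order-batching-problem | ils.py | remove_orders
-- ===== SOURCE A (Python) =====
-- def remove_orders(k,l,q):
--     removed_k = [(0,0) for i in range(len(k))]
--     removed_l = [(0,0) for i in range(len(l))]
--
--     j = 1
--     i = 1
--
--     while j <= q and i < len(k):
--         if k[i] != (0,0):
--             removed_k[i] = k[i]
--             k[i] = (0,0)
--             j += 1
--             i += 1
--         else:
--             i += 1
--
--     j = 1
--     i = 1
--
--     while j <= q and i < len(l):
--         if l[i] != (0,0):
--             removed_l[i] = l[i]
--             l[i] = (0,0)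
--             j += 1
--             i += 1
--         else:
--             i += 1
--
--     return k,l,removed_k,removed_l
-- ===== SOURCE B (Python) =====
-- def remove_orders(k, l, q):
--     def phase(xs):
--         # Phase 1: locate 'cut', one past the q-th non-(0,0) entry at index >= 1
--         # (only counting: no recording, no mutation here).
--         cut, need = 1, q
--         while need > 0 and cut < len(xs):
--             if xs[cut] != (0, 0):
--                 need -= 1
--             cut += 1
--         # Phase 2: slice surgery. Inside xs[1:cut] every non-(0,0) entry is removed
--         # and (0,0) entries map to (0,0), so the removed segment is xs[1:cut]
--         # verbatim and the new segment is all zeros.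
--         removed = [(0, 0)] * len(xs[:1]) + xs[1:cut] + [(0, 0)] * len(xs[cut:])
--         xs[1:cut] = [(0, 0)] * len(xs[1:cut])
--         return removed
--     return k, l, phase(k), phase(l)
-- ===== Notes on version B (the rewrite author's own statement) =====
-- stated objective: alternative
-- what changed: A interleaves recording and zeroing per element inside one counter-driven while loop; B first scans only to locate the split point 'cut' just past the q-th non-(0,0) entry, then builds the result by conditional-free slice surgery, using the identity that the removed segment is exactly xs[1:cut] and the new segment is all zeros.
import Mathlib
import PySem

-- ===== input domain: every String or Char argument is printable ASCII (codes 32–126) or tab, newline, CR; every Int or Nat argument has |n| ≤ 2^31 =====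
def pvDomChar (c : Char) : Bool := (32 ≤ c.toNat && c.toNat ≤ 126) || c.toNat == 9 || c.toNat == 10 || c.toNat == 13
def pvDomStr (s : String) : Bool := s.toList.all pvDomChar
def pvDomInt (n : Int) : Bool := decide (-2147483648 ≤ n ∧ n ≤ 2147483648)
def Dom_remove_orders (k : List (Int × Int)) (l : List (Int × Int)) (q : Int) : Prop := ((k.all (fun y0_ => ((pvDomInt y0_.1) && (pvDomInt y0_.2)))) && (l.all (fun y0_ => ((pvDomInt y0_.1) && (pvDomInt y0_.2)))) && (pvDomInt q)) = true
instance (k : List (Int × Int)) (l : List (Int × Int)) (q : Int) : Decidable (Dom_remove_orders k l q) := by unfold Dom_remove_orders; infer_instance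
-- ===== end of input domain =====

-- B replaces A's interleaved record-and-zero counter loop by: a counting-only scan that locates
-- the split point 'cut' just past the q-th non-(0,0) entry, then conditional-free slice surgery
-- (removed segment = xs[1:cut] verbatim, new segment = all zeros). Equal return value; B performs
-- the same in-place mutation of k and l as A (via slice assignment).

-- ===== PORT A =====
-- literal transliteration of A's two while loops (state: xs, removed, counters j and i);
-- 'fuel' only makes the recursion structural: xs.length steps always suffice since i increases each turn
def phaseAGo : Nat → List (Int × Int) → List (Int × Int) → Int → Nat → Int → List (Int × Int) × List (Int × Int)
  | 0, xs, removed, _, _, _ => (xs, removed)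
  | Nat.succ fuel, xs, removed, j, i, q =>
    if h : j ≤ q ∧ i < xs.length then
      if xs[i]'h.2 ≠ (0, 0) then
        phaseAGo fuel (xs.set i (0, 0)) (removed.set i (xs[i]'h.2)) (j + 1) (i + 1) q
      else
        phaseAGo fuel xs removed j (i + 1) q
    else (xs, removed)

def phaseA (xs removed : List (Int × Int)) (j : Int) (i : Nat) (q : Int) :
    List (Int × Int) × List (Int × Int) :=
  phaseAGo xs.length xs removed j i q

def remove_orders (k : List (Int × Int)) (l : List (Int × Int)) (q : Int) : (List (Int × Int)) × (List (Int × Int)) × (List (Int × Int)) × (List (Int × Int)) :=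
  let pk := phaseA k (List.replicate k.length ((0 : Int), (0 : Int))) 1 1 q
  let pl := phaseA l (List.replicate l.length ((0 : Int), (0 : Int))) 1 1 q
  (pk.1, pl.1, pk.2, pl.2)

-- ===== PORT B =====
-- port of Source B's counting scan: while need > 0 and cut < len(xs): …
def findCut (xs : List (Int × Int)) (need : Int) (cut : Nat) : Nat :=
  if h : 0 < need ∧ cut < xs.length then
    findCut xs (if xs[cut]'h.2 ≠ (0, 0) then need - 1 else need) (cut + 1)
  else cut
termination_by xs.length - cut

-- port of Source B's phase: locate cut, then slice surgery.
-- xs[1:cut] and xs[cut:] (1 ≤ cut, indices nonnegative) are ported as (xs.drop 1).take (cut-1)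
-- and xs.drop cut, exact here; [(0,0)]*len(s) as List.replicate s.length (0,0).
def phaseB (xs : List (Int × Int)) (q : Int) : List (Int × Int) × List (Int × Int) :=
  let cut := findCut xs q 1
  let mid := (xs.drop 1).take (cut - 1)
  let removed := List.replicate (xs.take 1).length ((0 : Int), (0 : Int)) ++ mid ++
      List.replicate (xs.drop cut).length ((0 : Int), (0 : Int))
  let newxs := xs.take 1 ++ List.replicate mid.length ((0 : Int), (0 : Int)) ++ xs.drop cut
  (newxs, removed)

def remove_orders_alt (k : List (Int × Int)) (l : List (Int × Int)) (q : Int) : (List (Int × Int)) × (List (Int × Int)) × (List (Int × Int)) × (List (Int × Int)) :=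
  let pk := phaseB k q
  let pl := phaseB l q
  (pk.1, pl.1, pk.2, pl.2)

-- ===== PRECONDITION & SPEC =====
def Spec_remove_orders (k : List (Int × Int)) (l : List (Int × Int)) (q : Int) (out : (List (Int × Int)) × (List (Int × Int)) × (List (Int × Int)) × (List (Int × Int))) : Prop := out = remove_orders_alt k l q
instance (k : List (Int × Int)) (l : List (Int × Int)) (q : Int) (out : (List (Int × Int)) × (List (Int × Int)) × (List (Int × Int)) × (List (Int × Int))) : Decidable (Spec_remove_orders k l q out) := by unfold Spec_remove_orders; infer_instance

-- ===== CLAIM (what is proved, stated in full; the proofs are below) =====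
def Claim_equal_remove_orders : Prop := ∀ (k : List (Int × Int)) (l : List (Int × Int)) (q : Int), Dom_remove_orders k l q → Spec_remove_orders k l q (remove_orders k l q)

-- ===== LEMMAS AND PROOFS =====

lemma findCut_ge_aux : ∀ (d : Nat) (xs : List (Int × Int)) (need : Int) (cut : Nat),
    xs.length - cut ≤ d → cut ≤ findCut xs need cut := by
  intro d
  induction d with
  | zero =>
    intro xs need cut hd
    rw [findCut, dif_neg (by omega)]
  | succ d ih =>
    intro xs need cut hd
    rw [findCut]
    by_cases h : 0 < need ∧ cut < xs.length
    · rw [dif_pos h]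
      exact Nat.le_trans (Nat.le_succ cut) (ih xs _ (cut + 1) (by omega))
    · rw [dif_neg h]

lemma findCut_ge (xs : List (Int × Int)) (need : Int) (cut : Nat) : cut ≤ findCut xs need cut :=
  findCut_ge_aux xs.length xs need cut (by omega)

lemma findCut_le_aux : ∀ (d : Nat) (xs : List (Int × Int)) (need : Int) (cut : Nat),
    xs.length - cut ≤ d → cut ≤ xs.length → findCut xs need cut ≤ xs.length := by
  intro d
  induction d with
  | zero =>
    intro xs need cut hd hc
    rw [findCut, dif_neg (by omega)]; exact hc
  | succ d ih =>
    intro xs need cut hd hc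
    rw [findCut]
    by_cases h : 0 < need ∧ cut < xs.length
    · rw [dif_pos h]
      exact ih xs _ (cut + 1) (by omega) (by omega)
    · rw [dif_neg h]; exact hc

lemma findCut_le (xs : List (Int × Int)) (need : Int) (cut : Nat) (hc : cut ≤ xs.length) :
    findCut xs need cut ≤ xs.length :=
  findCut_le_aux xs.length xs need cut (by omega) hc

lemma findCut_set_aux : ∀ (d : Nat) (xs : List (Int × Int)) (i : Nat) (v : Int × Int)
    (need : Int) (cut : Nat), xs.length - cut ≤ d → i < cut →
    findCut (xs.set i v) need cut = findCut xs need cut := by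
  intro d
  induction d with
  | zero =>
    intro xs i v need cut hd hic
    rw [findCut, findCut, dif_neg (by simp only [List.length_set]; omega), dif_neg (by omega)]
  | succ d ih =>
    intro xs i v need cut hd hic
    rw [findCut, findCut]
    by_cases h : 0 < need ∧ cut < xs.length
    · rw [dif_pos (by simp only [List.length_set]; exact h), dif_pos h]
      rw [List.getElem_set_ne (by omega)]
      exact ih xs i v _ (cut + 1) (by omega) (by omega)
    · rw [dif_neg (by simp only [List.length_set]; exact h), dif_neg h]

lemma goEq (q : Int) : ∀ (fuel : Nat) (xs removed : List (Int × Int)) (j : Int) (i : Nat),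
    xs.length - i ≤ fuel →
    removed.length = xs.length →
    removed.drop i = List.replicate (xs.length - i) ((0 : Int), (0 : Int)) →
    phaseAGo fuel xs removed j i q =
      ( xs.take i ++ List.replicate (findCut xs (q - j + 1) i - i) ((0 : Int), (0 : Int)) ++
          xs.drop (findCut xs (q - j + 1) i),
        removed.take i ++ (xs.drop i).take (findCut xs (q - j + 1) i - i) ++
          removed.drop (findCut xs (q - j + 1) i) ) := by
  intro fuel
  induction fuel with
  | zero =>
    intro xs removed j i hfu hlen hrem
    have hc : findCut xs (q - j + 1) i = i := by rw [findCut, dif_neg (by omega)]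
    rw [hc]
    simp [phaseAGo]
  | succ fuel ih =>
    intro xs removed j i hfu hlen hrem
    rw [phaseAGo]
    by_cases h : j ≤ q ∧ i < xs.length
    · rw [dif_pos h]
      rw [findCut, dif_pos (⟨by omega, h.2⟩ : 0 < q - j + 1 ∧ i < xs.length)]
      have hri : removed[i]? = some ((0 : Int), (0 : Int)) := by
        have h0 : (removed.drop i)[0]? = some ((0 : Int), (0 : Int)) := by
          rw [hrem]; simp [List.getElem?_replicate]; omega
        rw [List.getElem?_drop] at h0; simpa using h0
      have hremtail : removed.drop (i + 1) = List.replicate (xs.length - (i + 1)) ((0 : Int), (0 : Int)) := by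
        have : removed.drop (i + 1) = (removed.drop i).drop 1 := by rw [List.drop_drop]
        rw [this, hrem, List.drop_replicate]
        congr 1
      by_cases hz : xs[i]'h.2 = ((0 : Int), (0 : Int))
      · rw [if_neg (by simp [hz]), if_neg (by simp [hz])]
        rw [ih xs removed j (i + 1) (by omega) hlen hremtail]
        have hge := findCut_ge xs (q - j + 1) (i + 1)
        set c := findCut xs (q - j + 1) (i + 1) with hcdef
        have h1 : xs.take (i + 1) = xs.take i ++ [((0 : Int), (0 : Int))] := by
          rw [List.take_add_one, List.getElem?_eq_getElem h.2, hz]; rfl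
        have h2 : removed.take (i + 1) = removed.take i ++ [((0 : Int), (0 : Int))] := by
          rw [List.take_add_one, hri]; rfl
        have h3 : ((0 : Int), (0 : Int)) :: List.replicate (c - (i + 1)) ((0 : Int), (0 : Int)) =
            List.replicate (c - i) ((0 : Int), (0 : Int)) := by
          have : c - i = (c - (i + 1)) + 1 := by omega
          rw [this]; rfl
        have h4 : (xs.drop i).take (c - i) =
            ((0 : Int), (0 : Int)) :: (xs.drop (i + 1)).take (c - (i + 1)) := by
          rw [List.drop_eq_getElem_cons h.2, hz]
          have : c - i = (c - (i + 1)) + 1 := by omega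
          rw [this, List.take_succ_cons]
        rw [h1, h2, h4, ← h3]
        simp
      · rw [if_pos hz, if_pos hz]
        have hlset : (xs.set i ((0 : Int), (0 : Int))).length = xs.length := by simp
        have hrec := ih (xs.set i ((0 : Int), (0 : Int))) (removed.set i (xs[i]'h.2)) (j + 1) (i + 1)
          (by simp; omega) (by simp [hlen]) (by
            rw [List.drop_set, if_pos (by omega)]
            rw [hremtail, hlset])
        rw [hrec]
        have hneed : q - (j + 1) + 1 = q - j + 1 - 1 := by ring
        rw [hneed] at hrec ⊢
        rw [findCut_set_aux xs.length xs i ((0 : Int), (0 : Int)) (q - j + 1 - 1) (i + 1) (by omega) (by omega)]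
        have hge := findCut_ge xs (q - j + 1 - 1) (i + 1)
        set c := findCut xs (q - j + 1 - 1) (i + 1) with hcdef
        have h1 : (xs.set i ((0 : Int), (0 : Int))).take (i + 1) = xs.take i ++ [((0 : Int), (0 : Int))] := by
          rw [List.take_add_one, List.getElem?_set_self (by omega)]
          rw [List.take_set, List.set_eq_of_length_le (by simp)]
          rfl
        have h2 : (removed.set i (xs[i]'h.2)).take (i + 1) = removed.take i ++ [xs[i]'h.2] := by
          rw [List.take_add_one, List.getElem?_set_self (by omega)]
          rw [List.take_set, List.set_eq_of_length_le (by simp)]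
          rfl
        have h3 : ((0 : Int), (0 : Int)) :: List.replicate (c - (i + 1)) ((0 : Int), (0 : Int)) =
            List.replicate (c - i) ((0 : Int), (0 : Int)) := by
          have : c - i = (c - (i + 1)) + 1 := by omega
          rw [this]; rfl
        have hdropset : (xs.set i ((0 : Int), (0 : Int))).drop (i + 1) = xs.drop (i + 1) := by
          rw [List.drop_set, if_pos (by omega)]
        have hdropc : (xs.set i ((0 : Int), (0 : Int))).drop c = xs.drop c := by
          rw [List.drop_set, if_pos (by omega)]
        have hdropcr : (removed.set i (xs[i]'h.2)).drop c = removed.drop c := by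
          rw [List.drop_set, if_pos (by omega)]
        have h4 : (xs.drop i).take (c - i) = xs[i]'h.2 :: (xs.drop (i + 1)).take (c - (i + 1)) := by
          rw [List.drop_eq_getElem_cons h.2]
          have : c - i = (c - (i + 1)) + 1 := by omega
          rw [this, List.take_succ_cons]
        rw [h1, h2, hdropset, hdropc, hdropcr, h4, ← h3]
        simp
    · rw [dif_neg h]
      have hc : findCut xs (q - j + 1) i = i := by
        rw [findCut, dif_neg (fun hn => h ⟨by omega, hn.2⟩)]
      rw [hc]
      simp

lemma phase_eq (xs : List (Int × Int)) (q : Int) :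
    phaseA xs (List.replicate xs.length ((0 : Int), (0 : Int))) 1 1 q = phaseB xs q := by
  rw [phaseA, goEq q xs.length xs _ 1 1 (by omega) (by simp) (by rw [List.drop_replicate])]
  have hq : q - 1 + 1 = q := by ring
  rw [hq, phaseB]
  have hge := findCut_ge xs q 1
  set c := findCut xs q 1 with hcdef
  have hcle : c - 1 ≤ xs.length - 1 := by
    by_cases h0 : xs.length = 0
    · have : c = 1 := by rw [hcdef, findCut, dif_neg (by omega)]
      omega
    · have := findCut_le xs q 1 (by omega)
      omega
  simp [List.take_replicate, List.drop_replicate]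
  omega

-- ===== VERDICT (by name: the statement is the Claim_ definition above) =====
theorem remove_orders_spec : Claim_equal_remove_orders := by
  intro k l q _
  unfold Spec_remove_orders remove_orders remove_orders_alt
  rw [phase_eq k q, phase_eq l q]
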